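-- pv_equiv track=rewrite | github.com/caldermf/braidmod | braid_data.py | _poly_matrix_degree_bounds
-- ===== SOURCE A (Python) =====
-- def _poly_matrix_degree_bounds(poly_mat):
--     exponents = []
--     for row in poly_mat:
--         for entry in row:
--             exponents.extend(entry.keys())
--     if not exponents:
--         return 0, 0
--     return min(exponents), max(exponents)
-- ===== SOURCE B (Python) =====
-- def _poly_matrix_degree_bounds(poly_mat):
--     cur = None
--     for row in poly_mat:
--         for entry in row:
--             for k in entry:
--                 if cur is None:
--                     cur = (k, k)
--                 else:
--                     cur = (min(cur[0], k), max(cur[1], k))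
--     return cur if cur is not None else (0, 0)
-- ===== Notes on version B (the rewrite author's own statement) =====
-- stated objective: simpler
-- what changed: Replaces collect-all-exponents-then-min/max with a single streaming pass maintaining an optional (min,max) accumulator, never materialising the exponent list.
import Mathlib
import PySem

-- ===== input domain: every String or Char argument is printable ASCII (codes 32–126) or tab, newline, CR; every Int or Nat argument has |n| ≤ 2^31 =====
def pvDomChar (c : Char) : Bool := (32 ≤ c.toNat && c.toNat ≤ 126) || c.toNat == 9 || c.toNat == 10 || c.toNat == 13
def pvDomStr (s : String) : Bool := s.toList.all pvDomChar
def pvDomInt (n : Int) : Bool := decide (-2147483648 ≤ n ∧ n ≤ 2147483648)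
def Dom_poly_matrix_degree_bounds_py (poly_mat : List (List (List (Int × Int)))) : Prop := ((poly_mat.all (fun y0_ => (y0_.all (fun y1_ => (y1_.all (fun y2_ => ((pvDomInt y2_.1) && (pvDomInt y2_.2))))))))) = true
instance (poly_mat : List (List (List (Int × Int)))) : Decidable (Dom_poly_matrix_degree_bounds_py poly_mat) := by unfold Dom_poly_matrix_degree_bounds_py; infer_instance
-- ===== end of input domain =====

-- B streams one (min,max) accumulator over the exponents instead of materialising the list; same values, simpler shape.

-- ===== PORT A =====
-- literal port: build `exponents` by extend-ing the keys of every entry, then min/max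
def poly_matrix_degree_bounds_py (poly_mat : List (List (List (Int × Int)))) : Int × Int :=
  let exponents := poly_mat.foldl (fun acc row =>
      row.foldl (fun acc entry => acc ++ entry.map Prod.fst) acc) []
  if exponents = [] then (0, 0)
  else ((PySem.List.min? exponents (fun x => x)).getD 0,
        (PySem.List.max? exponents (fun x => x)).getD 0)

-- ===== PORT B =====
-- one step of B's accumulator update (the if cur is None / else branch)
def pvStep (c : Option (Int × Int)) (k : Int) : Option (Int × Int) :=
  match c with
  | none => some (k, k)
  | some (lo, hi) => some (min lo k, max hi k)

def poly_matrix_degree_bounds_py_alt (poly_mat : List (List (List (Int × Int)))) : Int × Int :=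
  let cur := poly_mat.foldl (fun c row =>
      row.foldl (fun c entry =>
        entry.foldl (fun c kv => pvStep c kv.1) c) c) (none : Option (Int × Int))
  match cur with
  | none => (0, 0)
  | some p => p

-- ===== PRECONDITION & SPEC =====
def Spec_poly_matrix_degree_bounds_py (poly_mat : List (List (List (Int × Int)))) (out : Int × Int) : Prop := out = poly_matrix_degree_bounds_py_alt poly_mat
instance (poly_mat : List (List (List (Int × Int)))) (out : Int × Int) : Decidable (Spec_poly_matrix_degree_bounds_py poly_mat out) := by unfold Spec_poly_matrix_degree_bounds_py; infer_instance

-- ===== CLAIM (what is proved, stated in full; the proofs are below) =====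
def Claim_equal_poly_matrix_degree_bounds_py : Prop := ∀ (poly_mat : List (List (List (Int × Int)))), Dom_poly_matrix_degree_bounds_py poly_mat → Spec_poly_matrix_degree_bounds_py poly_mat (poly_matrix_degree_bounds_py poly_mat)

-- ===== LEMMAS AND PROOFS =====

-- the flat list of all exponents, the common reference point of both proofs
def pvKeys (poly_mat : List (List (List (Int × Int)))) : List Int :=
  poly_mat.flatMap (fun row => row.flatMap (fun entry => entry.map Prod.fst))

theorem portA_exponents (poly_mat : List (List (List (Int × Int)))) (acc : List Int) :
    poly_mat.foldl (fun acc row =>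
      row.foldl (fun acc entry => acc ++ entry.map Prod.fst) acc) acc
    = acc ++ pvKeys poly_mat := by
  have h : (fun (acc : List Int) (row : List (List (Int × Int))) =>
      row.foldl (fun acc entry => acc ++ entry.map Prod.fst) acc)
      = fun acc row => acc ++ row.flatMap (fun entry => entry.map Prod.fst) := by
    funext acc row
    exact PySem.List.foldl_append_eq_flatMap _ _ _
  rw [h, PySem.List.foldl_append_eq_flatMap, pvKeys]

theorem portB_entry (row : List (List (Int × Int))) (c : Option (Int × Int)) :
    row.foldl (fun c entry =>
      entry.foldl (fun c kv => pvStep c kv.1) c) c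
    = (row.flatMap (fun entry => entry.map Prod.fst)).foldl pvStep c := by
  induction row generalizing c with
  | nil => rfl
  | cons e t ih => simp [List.flatMap_cons, List.foldl_append, ih, List.foldl_map]

theorem portB_cur (poly_mat : List (List (List (Int × Int)))) (c : Option (Int × Int)) :
    poly_mat.foldl (fun c row =>
      row.foldl (fun c entry =>
        entry.foldl (fun c kv => pvStep c kv.1) c) c) c
    = (pvKeys poly_mat).foldl pvStep c := by
  induction poly_mat generalizing c with
  | nil => rfl
  | cons r t ih =>
      rw [List.foldl_cons, ih]
      simp only [pvKeys, List.flatMap_cons, List.foldl_append, portB_entry]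

theorem foldl_pvStep_some (L : List Int) (lo hi : Int) :
    L.foldl pvStep (some (lo, hi)) = some (L.foldl min lo, L.foldl max hi) := by
  induction L generalizing lo hi with
  | nil => rfl
  | cons k t ih => simp [List.foldl_cons, pvStep, ih]

theorem foldl_pvStep_none (k : Int) (t : List Int) :
    (k :: t).foldl pvStep none = some (t.foldl min k, t.foldl max k) := by
  simp [List.foldl_cons, pvStep, foldl_pvStep_some]

-- ===== VERDICT (by name: the statement is the Claim_ definition above) =====
theorem poly_matrix_degree_bounds_py_spec : Claim_equal_poly_matrix_degree_bounds_py := by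
  intro poly_mat _
  unfold Spec_poly_matrix_degree_bounds_py poly_matrix_degree_bounds_py poly_matrix_degree_bounds_py_alt
  rw [portA_exponents, portB_cur, List.nil_append]
  cases h : pvKeys poly_mat with
  | nil => simp
  | cons k t =>
      rw [foldl_pvStep_none]
      simp [PySem.List.min?_id_cons, PySem.List.max?_id_cons]
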